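-- pv_equiv track=rewrite | github.com/nao7sep/shared | apps/poly-chat/src/poly_chat/text_formatting.py | text_to_lines
-- ===== SOURCE A (Python) =====
-- def text_to_lines(text: str) -> list[str]:
--     """Convert multiline text to line array with trimming."""
--     lines = text.split("\n")
--
--     # Find first non-whitespace-only line.
--     start = 0
--     for i, line in enumerate(lines):
--         if line.strip():
--             start = i
--             break
--     else:
--         return []
--
--     # Find last non-whitespace-only line.
--     end = len(lines)
--     for i in range(len(lines) - 1, -1, -1):
--         if lines[i].strip():
--             end = i + 1
--             break
--
--     return lines[start:end]
-- ===== SOURCE B (Python) =====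
-- def text_to_lines(text: str) -> list[str]:
--     """Convert multiline text to line array with trimming."""
--     def trim(lines):
--         # peel blank lines off the front
--         while lines and not lines[0].strip():
--             lines = lines[1:]
--         return lines
--     # trim the front, then trim the front of the reversal and flip back
--     return trim(trim(text.split("\n"))[::-1])[::-1]
-- ===== Notes on version B (the rewrite author's own statement) =====
-- stated objective: simpler
-- what changed: A locates the first and last non-blank line indices with two index-tracking loops (a for/else and a backwards range scan) and slices; B never computes indices: it peels blank lines off the front, reverses, peels again, and flips back.
import Mathlib
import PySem

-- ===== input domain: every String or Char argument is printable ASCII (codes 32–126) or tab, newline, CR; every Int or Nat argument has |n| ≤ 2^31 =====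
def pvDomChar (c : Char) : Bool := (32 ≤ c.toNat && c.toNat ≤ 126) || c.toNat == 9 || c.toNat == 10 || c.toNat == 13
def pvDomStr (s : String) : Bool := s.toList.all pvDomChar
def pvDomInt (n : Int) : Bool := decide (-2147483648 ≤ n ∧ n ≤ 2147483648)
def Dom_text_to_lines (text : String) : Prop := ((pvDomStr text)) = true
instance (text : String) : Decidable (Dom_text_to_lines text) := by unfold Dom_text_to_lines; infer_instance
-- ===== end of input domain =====

-- B trims blank edges by peeling (trim front, reverse, trim front, reverse) instead of
-- A's two index-finding loops plus a slice; objective: simpler.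


-- ===== PORT A =====
-- 'for i, line in enumerate(lines): if line.strip(): start = i; break / else: return []'
def pvFindStart : List String → Nat → Option Nat
  | [], _ => none
  | l :: rest, i => if PySem.Str.strip l != "" then some i else pvFindStart rest (i + 1)

-- 'end = len(lines); for i in range(len(lines)-1, -1, -1): if lines[i].strip(): end = i+1; break'
-- (lines[i] via pyGetD: every scanned index is in range)
def pvFindEnd (lines : List String) (e : Int) : List Int → Int
  | [] => e
  | i :: rest =>
      if PySem.Str.strip (PySem.List.pyGetD lines i "") != "" then i + 1
      else pvFindEnd lines e rest

def text_to_lines (text : String) : List String :=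
  -- sep "\n" is non-empty, so split? is always some; .getD [] is exact
  let lines := (PySem.Str.split? text "\n").getD []
  match pvFindStart lines 0 with
  | none => []
  | some start =>
      let e := pvFindEnd lines (lines.length : Int)
                 (PySem.List.pyRange ((lines.length : Int) - 1) (-1) (-1))
      PySem.List.slice lines (some (start : Int)) (some e)

-- ===== PORT B =====
-- 'while lines and not lines[0].strip(): lines = lines[1:]'
def pvTrim : List String → List String
  | [] => []
  | s :: rest => if PySem.Str.strip s == "" then pvTrim rest else s :: rest

def text_to_lines_alt (text : String) : List String :=
  (pvTrim ((pvTrim ((PySem.Str.split? text "\n").getD [])).reverse)).reverse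

-- ===== PRECONDITION & SPEC =====
def Spec_text_to_lines (text : String) (out : List String) : Prop := out = text_to_lines_alt text
instance (text : String) (out : List String) : Decidable (Spec_text_to_lines text out) := by unfold Spec_text_to_lines; infer_instance

-- ===== CLAIM (what is proved, stated in full; the proofs are below) =====
def Claim_equal_text_to_lines : Prop := ∀ (text : String), Dom_text_to_lines text → Spec_text_to_lines text (text_to_lines text)

-- ===== LEMMAS AND PROOFS =====

theorem pvTrim_eq_dropWhile (l : List String) :
    pvTrim l = l.dropWhile (fun s => PySem.Str.strip s == "") := by
  induction l with
  | nil => rfl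
  | cons s rest ih =>
      simp only [pvTrim, List.dropWhile]
      by_cases h : PySem.Str.strip s == ""
      · simp [h, ih]
      · simp [h]

theorem pvFindStart_none (l : List String) (i : Nat)
    (h : ∀ s ∈ l, PySem.Str.strip s == "") : pvFindStart l i = none := by
  induction l generalizing i with
  | nil => rfl
  | cons s rest ih =>
      have hs := h s (by simp)
      simp only [pvFindStart]
      rw [if_neg (by simp_all)]
      exact ih _ (fun t ht => h t (by simp [ht]))

theorem pvFindStart_some (l : List String) (i : Nat)
    (h : ∃ s ∈ l, ¬ (PySem.Str.strip s == "")) :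
    pvFindStart l i = some (i + (l.takeWhile (fun s => PySem.Str.strip s == "")).length) := by
  induction l generalizing i with
  | nil => simp at h
  | cons s rest ih =>
      by_cases hs : PySem.Str.strip s == ""
      · obtain ⟨t, ht, hts⟩ := h
        have hrest : ∃ t ∈ rest, ¬ (PySem.Str.strip t == "") := by
          rcases List.mem_cons.mp ht with rfl | hm
          · exact absurd hs hts
          · exact ⟨t, hm, hts⟩
        simp only [pvFindStart]
        rw [if_neg (by simp_all), ih _ hrest]
        simp [List.takeWhile, hs]
        omega
      · simp only [pvFindStart]
        rw [if_pos (by simp_all)]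
        simp [List.takeWhile, hs]

theorem pvFindEnd_shrink (l : List String) (x : String) (e : Int) (idxs : List Int)
    (h : ∀ i ∈ idxs, 0 ≤ i ∧ i < (l.length : Int)) :
    pvFindEnd (l ++ [x]) e idxs = pvFindEnd l e idxs := by
  induction idxs with
  | nil => rfl
  | cons i rest ih =>
      obtain ⟨h0, hlt⟩ := h i (by simp)
      have hget : PySem.List.pyGetD (l ++ [x]) i "" = PySem.List.pyGetD l i "" := by
        obtain ⟨n, rfl⟩ := Int.eq_ofNat_of_zero_le h0
        have hn : n < l.length := by exact_mod_cast hlt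
        rw [PySem.List.pyGetD_natCast, PySem.List.pyGetD_natCast]
        rw [List.getD_eq_getElem?_getD, List.getD_eq_getElem?_getD,
            List.getElem?_append_left hn]
      simp only [pvFindEnd, hget]
      split_ifs with hb
      · rfl
      · exact ih (fun j hj => h j (by simp [hj]))

theorem dropWhile_eq_drop_takeWhile {α : Type} (p : α → Bool) (xs : List α) :
    xs.dropWhile p = xs.drop (xs.takeWhile p).length := by
  induction xs with
  | nil => simp
  | cons x t ih =>
      by_cases hx : p x
      · simp [List.dropWhile, List.takeWhile, hx, ih]
      · simp [List.dropWhile, List.takeWhile, hx]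

theorem pvFindEnd_spec (l : List String) (e : Int)
    (h : ∃ s ∈ l, ¬ (PySem.Str.strip s == "")) :
    pvFindEnd l e (PySem.List.pyRange ((l.length : Int) - 1) (-1) (-1))
      = ((l.length - (l.reverse.takeWhile (fun s => PySem.Str.strip s == "")).length : Nat) : Int) := by
  induction l using List.reverseRecOn with
  | nil => simp at h
  | append_singleton l x ih =>
      have hlen : ((l ++ [x]).length : Int) - 1 = (l.length : Int) := by simp
      rw [hlen, PySem.List.pyRange_neg_one_cons (by omega)]
      have hget : PySem.List.pyGetD (l ++ [x]) (l.length : Int) "" = x := by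
        rw [PySem.List.pyGetD_natCast]
        simp [List.getD_eq_getElem?_getD]
      by_cases hx : PySem.Str.strip x == ""
      · -- last line blank: recurse into l
        have hl : ∃ s ∈ l, ¬ (PySem.Str.strip s == "") := by
          obtain ⟨t, ht, hts⟩ := h
          rcases List.mem_append.mp ht with hm | hm
          · exact ⟨t, hm, hts⟩
          · simp at hm; subst hm; exact absurd hx hts
        simp only [pvFindEnd, hget]
        rw [if_neg (by simp_all)]
        rw [pvFindEnd_shrink l x e _
            (fun i hi => by
              have := (PySem.List.mem_pyRange_neg_one).mp hi
              omega)]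
        rw [ih hl]
        have hk : (l.reverse.takeWhile (fun s => PySem.Str.strip s == "")).length ≤ l.length := by
          have := (List.takeWhile_prefix (l := l.reverse) (fun s => PySem.Str.strip s == "")).length_le
          simpa using this
        simp [List.takeWhile, hx]
      · -- last line non-blank: break with i+1 = length
        simp only [pvFindEnd, hget]
        rw [if_pos (by simp_all)]
        simp [List.takeWhile, hx]

theorem takeWhile_take {α : Type} (p : α → Bool) (xs : List α) (n : Nat) :
    (xs.take n).takeWhile p = (xs.takeWhile p).take n := by
  induction xs generalizing n with
  | nil => simp
  | cons x t ih =>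
      cases n with
      | zero => simp [List.takeWhile]
      | succ m =>
          simp only [List.take, List.takeWhile]
          by_cases hx : p x
          · simp [hx, ih]
          · simp [hx]

-- p (xs[(takeWhile p xs).length]) = false when the takeWhile stops inside xs
theorem getElem_after_takeWhile {α : Type} (p : α → Bool) (xs : List α)
    (h : (xs.takeWhile p).length < xs.length) :
    p (xs[(xs.takeWhile p).length]'h) = false := by
  induction xs with
  | nil => simp at h
  | cons x t ih =>
      by_cases hx : p x
      · simp only [List.takeWhile, hx] at h ⊢
        simpa using ih (by simpa using h)
      · simp [hx]

-- the core equivalence over an arbitrary line list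
theorem core_eq (l : List String) :
    (match pvFindStart l 0 with
     | none => []
     | some start =>
         PySem.List.slice l (some (start : Int))
           (some (pvFindEnd l (l.length : Int)
              (PySem.List.pyRange ((l.length : Int) - 1) (-1) (-1)))))
      = (pvTrim ((pvTrim l).reverse)).reverse := by
  set p : String → Bool := fun s => PySem.Str.strip s == "" with hp
  by_cases hall : ∀ s ∈ l, p s
  · rw [pvFindStart_none l 0 hall]
    have h1 : pvTrim l = [] := by
      rw [pvTrim_eq_dropWhile, List.dropWhile_eq_nil_iff]
      intro x hx
      have := hall x hx
      rw [hp] at this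
      simpa using this
    simp [h1, pvTrim]
  · push_neg at hall
    obtain ⟨t, ht, hts⟩ := hall
    have hex : ∃ s ∈ l, ¬ (p s = true) := ⟨t, ht, by simp [hts]⟩
    rw [pvFindStart_some l 0 hex, pvFindEnd_spec l _ hex]
    set s := (l.takeWhile p).length with hs
    set k := (l.reverse.takeWhile p).length with hk
    have hsl : s < l.length := by
      rcases lt_or_eq_of_le ((List.takeWhile_prefix (l := l) p).length_le) with h | h
      · exact h
      · exfalso
        have heq := (List.takeWhile_prefix (l := l) p).eq_of_length h
        rw [List.takeWhile_eq_self_iff] at heq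
        exact hts (heq t ht)
    -- p (l[s]) = false
    have hps : p (l[s]'hsl) = false := getElem_after_takeWhile p l hsl
    -- k ≤ l.length - 1 - s : the element of l.reverse at index (l.length - 1 - s) is l[s]
    have hkb : k ≤ l.length - 1 - s := by
      by_contra hgt
      push_neg at hgt
      have hik : l.length - 1 - s < (l.reverse.takeWhile p).length := by omega
      obtain ⟨u, hu⟩ : ∃ u, (l.reverse.takeWhile p)[l.length - 1 - s]? = some u :=
        ⟨_, List.getElem?_eq_getElem hik⟩
      have hpu : p u = true := List.mem_takeWhile_imp (List.mem_of_getElem? hu)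
      obtain ⟨tl, htl⟩ := List.takeWhile_prefix (l := l.reverse) p
      have hrev : l.reverse[l.length - 1 - s]? = some u := by
        rw [← htl, List.getElem?_append_left hik]; exact hu
      have hrev2 : l.reverse[l.length - 1 - s]? = some (l[s]'hsl) := by
        rw [List.getElem?_reverse (by simpa using by omega)]
        have hidx2 : l.length - 1 - (l.length - 1 - s) = s := by omega
        rw [hidx2, List.getElem?_eq_getElem hsl]
      rw [hrev] at hrev2
      have hue : u = l[s]'hsl := by injection hrev2
      rw [hue, hps] at hpu
      exact Bool.false_ne_true hpu
    -- A's slice in drop/take form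
    rw [show ((0 : Nat) + s : Nat) = s by omega]
    show PySem.List.slice l (some (s : Int)) (some ((l.length - k : Nat) : Int))
        = (pvTrim ((pvTrim l).reverse)).reverse
    rw [PySem.List.slice_natCast]
    -- B in drop/take form
    have hB : (pvTrim ((pvTrim l).reverse)).reverse
        = (l.drop s).take ((l.length - s) - k) := by
      have h1 : pvTrim l = l.drop s := by
        rw [pvTrim_eq_dropWhile, dropWhile_eq_drop_takeWhile, ← hp, ← hs]
      have h3 : ((l.drop s).reverse.takeWhile p).length = k := by
        rw [List.reverse_drop, takeWhile_take, List.length_take, ← hk]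
        omega
      have h2 : pvTrim ((l.drop s).reverse) = (l.drop s).reverse.drop k := by
        rw [pvTrim_eq_dropWhile, dropWhile_eq_drop_takeWhile, ← hp, h3]
      rw [h1, h2, List.drop_reverse, List.reverse_reverse, List.length_drop]
    rw [hB]
    congr 1
    omega

-- ===== VERDICT (by name: the statement is the Claim_ definition above) =====
theorem text_to_lines_spec : Claim_equal_text_to_lines := by
  intro text _
  unfold Spec_text_to_lines text_to_lines text_to_lines_alt
  exact core_eq ((PySem.Str.split? text "\n").getD [])
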